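-- pv_equiv track=rewrite | github.com/parsimo2010/CWformer | metrics.py | per_position_errors
-- ===== SOURCE A (Python) =====
-- from typing import List
--
-- def per_position_errors(hypothesis: str, reference: str) -> List[bool]:
--     """Per-reference-character correctness flags via Levenshtein alignment.
--
--     Returns a list of booleans, one per reference character. ``True`` means
--     that character was matched exactly in the optimal alignment; ``False``
--     means it was substituted or deleted. Uses the standard DP matrix
--     backtrace to find the alignment.
--     """
--     h = hypothesis.strip().upper()
--     r = reference.strip().upper()
--     if not r:
--         return []
--
--     n, m = len(r), len(h)
--
--     # Build DP matrix
--     dp = [[0] * (m + 1) for _ in range(n + 1)]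
--     for i in range(n + 1):
--         dp[i][0] = i
--     for j in range(m + 1):
--         dp[0][j] = j
--     for i in range(1, n + 1):
--         for j in range(1, m + 1):
--             cost = 0 if r[i - 1] == h[j - 1] else 1
--             dp[i][j] = min(
--                 dp[i - 1][j] + 1,          # deletion (ref char skipped)
--                 dp[i][j - 1] + 1,          # insertion (extra hyp char)
--                 dp[i - 1][j - 1] + cost,   # match/substitution
--             )
--
--     # Backtrace to get per-ref-char correct/error
--     correct = [False] * n
--     i, j = n, m
--     while i > 0 or j > 0:
--         if i > 0 and j > 0:
--             cost = 0 if r[i - 1] == h[j - 1] else 1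
--             if dp[i][j] == dp[i - 1][j - 1] + cost:
--                 if cost == 0:
--                     correct[i - 1] = True
--                 i -= 1
--                 j -= 1
--                 continue
--         if j > 0 and dp[i][j] == dp[i][j - 1] + 1:
--             j -= 1  # insertion — skip hyp char
--         elif i > 0 and dp[i][j] == dp[i - 1][j] + 1:
--             i -= 1  # deletion — ref char missed, correct[i] stays False
--         else:
--             # Defensive: shouldn't be reachable given the DP recurrence.
--             if i > 0:
--                 i -= 1
--             if j > 0:
--                 j -= 1
--
--     return correct
-- ===== SOURCE B (Python) =====
-- from typing import List
--
-- def per_position_errors(hypothesis: str, reference: str) -> List[bool]: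
--     """Forward DP with no backtrace: one pass fills each cost cell and, alongside
--     it, a shared immutable chain (nested pairs) of the reference indices matched
--     on the backtrace-preferred path to that cell (diagonal, then insertion, then
--     deletion); the chain at (n, m) is decoded into the flags list at the end."""
--     h = hypothesis.strip().upper()
--     r = reference.strip().upper()
--     if not r:
--         return []
--
--     n, m = len(r), len(h)
--
--     # row 0: cost j, no matches on the all-insertions path
--     prev = [(j, None) for j in range(m + 1)]
--
--     for i in range(1, n + 1):
--         cur = [(i, None)]  # column 0: all-deletions path, no matches
--         for j in range(1, m + 1):
--             cost = 0 if r[i - 1] == h[j - 1] else 1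
--             dc, dch = prev[j - 1]
--             ic, ich = cur[j - 1]
--             ec, ech = prev[j]
--             diag = dc + cost
--             ins = ic + 1
--             dele = ec + 1
--             best = min(dele, ins, diag)
--             if best == diag:
--                 cur.append((best, (i - 1, dch) if cost == 0 else dch))
--             elif best == ins:
--                 cur.append((best, ich))
--             else:
--                 cur.append((best, ech))
--         prev = cur
--
--     correct = [False] * n
--     chain = prev[m][1]
--     while chain is not None:
--         idx, chain = chain
--         correct[idx] = True
--     return correct
-- ===== Notes on version B (the rewrite author's own statement) =====
-- stated objective: alternative
-- what changed: B eliminates A's backtrace entirely: a single forward pass keeps, next to each DP cost cell, a shared immutable chain of the reference indices matched on the backtrace-preferred path (diagonal, then insertion, then deletion), keeping only two rows and decoding the chain at (n,m) into the flags list, instead of building the full matrix and walking it backwards.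
import Mathlib
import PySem

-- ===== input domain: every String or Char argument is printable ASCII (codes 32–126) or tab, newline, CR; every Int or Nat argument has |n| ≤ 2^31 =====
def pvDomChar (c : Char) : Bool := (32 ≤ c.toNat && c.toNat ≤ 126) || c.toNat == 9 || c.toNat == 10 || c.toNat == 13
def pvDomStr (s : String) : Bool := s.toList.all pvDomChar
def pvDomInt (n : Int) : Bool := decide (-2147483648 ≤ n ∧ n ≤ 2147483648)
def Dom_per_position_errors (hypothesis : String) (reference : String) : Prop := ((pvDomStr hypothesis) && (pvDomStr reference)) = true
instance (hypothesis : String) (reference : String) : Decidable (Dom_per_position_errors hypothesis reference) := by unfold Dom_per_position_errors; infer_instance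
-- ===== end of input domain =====

-- B replaces A's build-matrix-then-backtrace by a single forward pass that propagates,
-- next to each cost cell, a shared chain of the reference indices matched on the
-- backtrace-preferred path; objective: alternative (no backtrace pass, two rows kept).

-- ===== PORT A =====

-- dp[i][j] table lookup; every index both programs use is in range, where getD is exact.
def pvDpg (dp : List (List Nat)) (i j : Nat) : Nat := (dp.getD i []).getD j 0

-- interior of dp row i (j = 1..m), walking the previous row; left = dp[i][j-1]
def pvRowAux (c : Char) (hs : List Char) (prev : List Nat) (left : Nat) : List Nat :=
  match hs, prev with
  | hj :: hs', p0 :: p1 :: ps =>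
      let cost := if c = hj then 0 else 1
      let v := min (p1 + 1) (min (left + 1) (p0 + cost))
      v :: pvRowAux c hs' (p1 :: ps) v
  | _, _ => []

-- dp row i: starts with dp[i][0] = i, then the interior
def pvNextRow (c : Char) (h : List Char) (prev : List Nat) (i : Nat) : List Nat :=
  i :: pvRowAux c h prev i

-- rows 1..n of the dp matrix
def pvRows (h : List Char) : List Char → List Nat → Nat → List (List Nat)
  | [], _, _ => []
  | c :: cs, prev, i => let cur := pvNextRow c h prev i; cur :: pvRows h cs cur (i + 1)

-- the full dp matrix (row 0 is the border row dp[0][j] = j)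
def pvBuildDP (r h : List Char) : List (List Nat) :=
  let row0 := List.range (h.length + 1)
  row0 :: pvRows h r row0 1

-- A's backtrace while-loop: recompute the cost and compare dp entries at each step.
-- The fuel argument (called with i + j, which every iteration strictly decreases) only
-- makes the recursion structural; it is never exhausted on a reachable state.
def pvBackA (r h : List Char) (dp : List (List Nat)) : Nat → Nat → Nat → List Bool → List Bool
  | 0, _, _, correct => correct
  | fuel + 1, i, j, correct =>
    if i = 0 ∧ j = 0 then correct
    else if 0 < i ∧ 0 < j ∧
        pvDpg dp i j = pvDpg dp (i - 1) (j - 1) + (if r.getD (i - 1) ' ' = h.getD (j - 1) ' ' then 0 else 1) then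
      pvBackA r h dp fuel (i - 1) (j - 1)
        (if r.getD (i - 1) ' ' = h.getD (j - 1) ' ' then correct.set (i - 1) true else correct)
    else if 0 < j ∧ pvDpg dp i j = pvDpg dp i (j - 1) + 1 then
      pvBackA r h dp fuel i (j - 1) correct
    else if 0 < i ∧ pvDpg dp i j = pvDpg dp (i - 1) j + 1 then
      pvBackA r h dp fuel (i - 1) j correct
    else
      pvBackA r h dp fuel (if 0 < i then i - 1 else i) (if 0 < j then j - 1 else j) correct

def per_position_errors (hypothesis : String) (reference : String) : List Bool :=
  let h := (PySem.Str.upper (PySem.Str.strip hypothesis)).toList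
  let r := (PySem.Str.upper (PySem.Str.strip reference)).toList
  if r = [] then []
  else
    let dp := pvBuildDP r h
    pvBackA r h dp (r.length + h.length) r.length h.length (List.replicate r.length false)

-- ===== PORT B =====

-- B's inner loop (j = t+1 .. m): consumes the previous row's (cost, chain) pairs in
-- parallel with the remaining hypothesis chars, carrying the current row's last cost
-- (left) and last match-chain (leftch); a chain is the shared list of matched
-- reference indices on the path to the cell (Python's nested pairs, None = []).
def pvRowB (c : Char) (i : Nat) : List Char → List (Nat × List Nat) → Nat → List Nat → List (Nat × List Nat)
  | hj :: hs', (dc, dch) :: (ec, ech) :: ps, left, leftch =>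
      let cost := if c = hj then 0 else 1
      let diag := dc + cost
      let ins := left + 1
      let del := ec + 1
      let best := min del (min ins diag)
      let ch := if best = diag then (if cost = 0 then (i - 1) :: dch else dch)
                else if best = ins then leftch
                else ech
      (best, ch) :: pvRowB c i hs' ((ec, ech) :: ps) best ch
  | _, _, _, _ => []

-- B's outer loop over reference chars (rows i = 1..n), keeping the previous row only
def pvRowsB (h : List Char) : List Char → List (Nat × List Nat) → Nat → List (Nat × List Nat)
  | [], prev, _ => prev
  | c :: cs, prev, i => pvRowsB h cs ((i, ([] : List Nat)) :: pvRowB c i h prev i []) (i + 1)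

-- B's final while-loop: decode the chain of matched indices into the flags list
def pvDecode : List Nat → List Bool → List Bool
  | [], correct => correct
  | idx :: rest, correct => pvDecode rest (correct.set idx true)

def per_position_errors_alt (hypothesis : String) (reference : String) : List Bool :=
  let h := (PySem.Str.upper (PySem.Str.strip hypothesis)).toList
  let r := (PySem.Str.upper (PySem.Str.strip reference)).toList
  if r = [] then []
  else
    let prev := pvRowsB h r ((List.range (h.length + 1)).map (fun j => (j, ([] : List Nat)))) 1
    pvDecode (prev.getD h.length (0, [])).2 (List.replicate r.length false)

-- ===== PRECONDITION & SPEC =====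
def Spec_per_position_errors (hypothesis : String) (reference : String) (out : List Bool) : Prop := out = per_position_errors_alt hypothesis reference
instance (hypothesis : String) (reference : String) (out : List Bool) : Decidable (Spec_per_position_errors hypothesis reference out) := by unfold Spec_per_position_errors; infer_instance

-- ===== CLAIM (what is proved, stated in full; the proofs are below) =====
def Claim_equal_per_position_errors : Prop := ∀ (hypothesis : String) (reference : String), Dom_per_position_errors hypothesis reference → Spec_per_position_errors hypothesis reference (per_position_errors hypothesis reference)

-- ===== LEMMAS AND PROOFS =====

-- row i of the dp matrix, as its own recursion
def pvRowF (r h : List Char) : Nat → List Nat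
  | 0 => List.range (h.length + 1)
  | i + 1 => pvNextRow (r.getD i ' ') h (pvRowF r h i) (i + 1)

-- the flags vector of the backtrace-preferred path from (i, j) back to (0, 0)
def pvF (r h : List Char) : Nat → Nat → List Bool
  | 0, _ => List.replicate r.length false
  | _ + 1, 0 => List.replicate r.length false
  | i + 1, j + 1 =>
      let cost := if r.getD i ' ' = h.getD j ' ' then 0 else 1
      if (pvRowF r h (i + 1)).getD (j + 1) 0 = (pvRowF r h i).getD j 0 + cost then
        (if cost = 0 then (pvF r h i j).set i true else pvF r h i j)
      else if (pvRowF r h (i + 1)).getD (j + 1) 0 = (pvRowF r h (i + 1)).getD j 0 + 1 then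
        pvF r h (i + 1) j
      else pvF r h i (j + 1)
  termination_by i j => (i, j)

def pvFlagRow (r h : List Char) (i : Nat) : List (List Bool) :=
  (List.range (h.length + 1)).map (pvF r h i)

lemma pvRowAux_length (c : Char) : ∀ (hs : List Char) (prev : List Nat) (left : Nat),
    prev.length = hs.length + 1 → (pvRowAux c hs prev left).length = hs.length := by
  intro hs
  induction hs with
  | nil =>
    intro prev left _
    match prev with
    | [] => rfl
    | [p] => rfl
    | p0 :: p1 :: ps => rfl
  | cons hj hs' ih =>
    intro prev left hlen
    match prev with
    | p0 :: p1 :: ps =>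
      rw [pvRowAux]
      simp only [List.length_cons]
      rw [ih (p1 :: ps) _ (by simpa using hlen)]

lemma pvRowF_length (r h : List Char) : ∀ i, (pvRowF r h i).length = h.length + 1 := by
  intro i
  induction i with
  | zero => simp [pvRowF]
  | succ i ih =>
    rw [pvRowF, pvNextRow]
    simp [pvRowAux_length _ _ _ _ ih]

lemma pvRowF_getD0 (r h : List Char) (i : Nat) : (pvRowF r h i).getD 0 0 = i := by
  cases i with
  | zero => simp [pvRowF, List.getD]
  | succ i => rw [pvRowF, pvNextRow]; rfl

lemma pvRowF_row0 (r h : List Char) (j : Nat) (hj : j ≤ h.length) :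
    (pvRowF r h 0).getD j 0 = j := by
  rw [pvRowF]
  simp [List.getD, Nat.lt_succ_of_le hj]

-- the dp row suffix computed by pvRowAux, characterised against pvRowF
lemma pvRowF_suffix (r h : List Char) (i' : Nat) : ∀ t, t ≤ h.length →
    pvRowAux (r.getD i' ' ') (h.drop t) ((pvRowF r h i').drop t) ((pvRowF r h (i' + 1)).getD t 0)
      = (pvRowF r h (i' + 1)).drop (t + 1) := by
  intro t
  induction t with
  | zero =>
    intro _
    rw [pvRowF_getD0]
    conv_rhs => rw [pvRowF, pvNextRow]
    simp
  | succ t ih =>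
    intro ht
    have ht' : t < h.length := by omega
    have ih' := ih (by omega)
    have hlenP : t + 1 < (pvRowF r h i').length := by rw [pvRowF_length]; omega
    have hlenP0 : t < (pvRowF r h i').length := by omega
    have hlenC : t + 1 < (pvRowF r h (i' + 1)).length := by rw [pvRowF_length]; omega
    rw [List.drop_eq_getElem_cons ht', List.drop_eq_getElem_cons hlenP0,
        List.drop_eq_getElem_cons hlenP] at ih'
    rw [pvRowAux] at ih'
    rw [List.drop_eq_getElem_cons hlenC] at ih'
    simp only [List.cons.injEq] at ih'
    obtain ⟨hv, htail⟩ := ih'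
    rw [List.getD_eq_getElem _ _ hlenC, ← hv,
        List.drop_eq_getElem_cons hlenP]
    exact htail

-- the dp recurrence, read off pvRowF
lemma pvRowF_rec (r h : List Char) (i' t : Nat) (ht : t < h.length) :
    (pvRowF r h (i' + 1)).getD (t + 1) 0 =
      min ((pvRowF r h i').getD (t + 1) 0 + 1)
        (min ((pvRowF r h (i' + 1)).getD t 0 + 1)
          ((pvRowF r h i').getD t 0 + (if r.getD i' ' ' = h.getD t ' ' then 0 else 1))) := by
  have hs := pvRowF_suffix r h i' t (by omega)
  have hlenP : t + 1 < (pvRowF r h i').length := by rw [pvRowF_length]; omega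
  have hlenP0 : t < (pvRowF r h i').length := by omega
  have hlenC : t + 1 < (pvRowF r h (i' + 1)).length := by rw [pvRowF_length]; omega
  rw [List.drop_eq_getElem_cons ht, List.drop_eq_getElem_cons hlenP0,
      List.drop_eq_getElem_cons hlenP] at hs
  rw [pvRowAux] at hs
  rw [List.drop_eq_getElem_cons hlenC] at hs
  simp only [List.cons.injEq] at hs
  rw [List.getD_eq_getElem _ _ hlenC, ← hs.1,
      List.getD_eq_getElem _ _ hlenP, List.getD_eq_getElem _ _ hlenP0,
      List.getD_eq_getElem _ _ (show t < h.length from ht)]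

-- the built matrix's rows are pvRowF
lemma pvRows_getD (r h : List Char) : ∀ (cs : List Char) (t idx : Nat),
    cs = r.drop t → idx < cs.length →
    (pvRows h cs (pvRowF r h t) (t + 1)).getD idx [] = pvRowF r h (t + 1 + idx) := by
  intro cs
  induction cs with
  | nil => intro t idx _ hlt; simp at hlt
  | cons c cs' ih =>
    intro t idx hcs hlt
    have htlen : t < r.length := by
      by_contra hge
      rw [List.drop_eq_nil_of_le (by omega)] at hcs
      simp at hcs
    have hdec := List.drop_eq_getElem_cons (l := r) htlen
    rw [hdec] at hcs
    injection hcs with hc hcs'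
    have hcur : pvNextRow c h (pvRowF r h t) (t + 1) = pvRowF r h (t + 1) := by
      rw [hc]
      conv_rhs => rw [pvRowF]
      rw [List.getD_eq_getElem _ _ htlen]
    cases idx with
    | zero => simp [pvRows, hcur]
    | succ idx' =>
      rw [pvRows]
      simp only [List.getD_cons_succ]
      rw [hcur]
      have := ih (t + 1) idx' hcs' (by simpa using hlt)
      rw [this]
      congr 1
      omega

lemma pvDpg_rowF (r h : List Char) (i j : Nat) (hi : i ≤ r.length) :
    pvDpg (pvBuildDP r h) i j = (pvRowF r h i).getD j 0 := by
  cases i with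
  | zero => rw [pvDpg, pvBuildDP, pvRowF]; rfl
  | succ i' =>
    rw [pvDpg, pvBuildDP]
    simp only [List.getD_cons_succ]
    have hrows := pvRows_getD r h r 0 i' (show r = r.drop 0 by simp) hi
    simp only [show 0 + 1 + i' = i' + 1 from by omega] at hrows
    rw [show (List.range (h.length + 1)) = pvRowF r h 0 from by rw [pvRowF], hrows]

-- the chain of reference indices matched on the backtrace-preferred path from (i, j)
def pvC (r h : List Char) : Nat → Nat → List Nat
  | 0, _ => []
  | _ + 1, 0 => []
  | i + 1, j + 1 =>
      let cost := if r.getD i ' ' = h.getD j ' ' then 0 else 1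
      if (pvRowF r h (i + 1)).getD (j + 1) 0 = (pvRowF r h i).getD j 0 + cost then
        (if cost = 0 then i :: pvC r h i j else pvC r h i j)
      else if (pvRowF r h (i + 1)).getD (j + 1) 0 = (pvRowF r h (i + 1)).getD j 0 + 1 then
        pvC r h (i + 1) j
      else pvC r h i (j + 1)
  termination_by i j => (i, j)

lemma pvC_zl (r h : List Char) (j : Nat) : pvC r h 0 j = [] := by
  cases j <;> rw [pvC]

lemma pvC_zr (r h : List Char) (i : Nat) : pvC r h i 0 = [] := by
  cases i <;> rw [pvC]

-- A's backtrace computes exactly the chain's indices, set into the accumulator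
lemma backA_eq_C (r h : List Char) : ∀ (fuel i j : Nat) (c : List Bool),
    i + j ≤ fuel → i ≤ r.length → j ≤ h.length →
    pvBackA r h (pvBuildDP r h) fuel i j c = pvDecode (pvC r h i j) c := by
  intro fuel
  induction fuel with
  | zero =>
    intro i j c hf hi hj
    have hi0 : i = 0 := by omega
    have hj0 : j = 0 := by omega
    subst hi0; subst hj0
    rw [pvBackA, pvC_zl, pvDecode]
  | succ fuel ih =>
    intro i j c hf hi hj
    by_cases h00 : i = 0 ∧ j = 0
    · obtain ⟨rfl, rfl⟩ := h00
      have hstep : pvBackA r h (pvBuildDP r h) (fuel + 1) 0 0 c = c := by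
        rw [pvBackA]; simp
      rw [hstep, pvC_zl, pvDecode]
    · rcases Nat.eq_zero_or_pos i with rfl | hipos
      · -- i = 0, j > 0: insertion along row 0
        have hjpos : 0 < j := by omega
        rw [pvBackA, if_neg h00, if_neg (by simp),
            if_pos ⟨hjpos, by
              rw [pvDpg_rowF r h 0 j (by omega), pvDpg_rowF r h 0 (j - 1) (by omega),
                  pvRowF_row0 r h j hj, pvRowF_row0 r h (j - 1) (by omega)]
              omega⟩]
        rw [ih 0 (j - 1) c (by omega) (by omega) (by omega)]
        simp only [pvC_zl]
      · rcases Nat.eq_zero_or_pos j with rfl | hjpos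
        · -- j = 0, i > 0: deletion along column 0
          rw [pvBackA, if_neg h00, if_neg (by simp), if_neg (by simp),
              if_pos ⟨hipos, by
                rw [pvDpg_rowF r h i 0 hi, pvDpg_rowF r h (i - 1) 0 (by omega),
                    pvRowF_getD0, pvRowF_getD0]
                omega⟩]
          rw [ih (i - 1) 0 c (by omega) (by omega) (by omega)]
          simp only [pvC_zr]
        · -- interior
          obtain ⟨i', rfl⟩ : ∃ i', i = i' + 1 := ⟨i - 1, by omega⟩
          obtain ⟨j', rfl⟩ : ∃ j', j = j' + 1 := ⟨j - 1, by omega⟩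
          have hi' : i' ≤ r.length := by omega
          have hj' : j' < h.length := by omega
          have hA := pvDpg_rowF r h (i' + 1) (j' + 1) hi
          have hB := pvDpg_rowF r h i' j' hi'
          have hC := pvDpg_rowF r h (i' + 1) j' hi
          have hD := pvDpg_rowF r h i' (j' + 1) hi'
          have hrec := pvRowF_rec r h i' j' hj'
          set cost := (if r.getD i' ' ' = h.getD j' ' ' then 0 else 1) with hcost
          by_cases hd : (pvRowF r h (i' + 1)).getD (j' + 1) 0 = (pvRowF r h i').getD j' 0 + cost
          · rw [pvBackA, if_neg h00]
            rw [if_pos (by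
              refine ⟨by omega, by omega, ?_⟩
              simp only [Nat.add_sub_cancel]
              rw [hA, hB, ← hcost, hd])]
            simp only [Nat.add_sub_cancel]
            by_cases hcc : r.getD i' ' ' = h.getD j' ' '
            · rw [if_pos hcc, ih i' j' (c.set i' true) (by omega) hi' (by omega)]
              conv_rhs => rw [pvC]
              simp only [← hcost]
              rw [if_pos hd]
              have hc0 : cost = 0 := by rw [hcost, if_pos hcc]
              rw [if_pos hc0, pvDecode]
            · rw [if_neg hcc, ih i' j' c (by omega) hi' (by omega)]
              conv_rhs => rw [pvC]
              simp only [← hcost]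
              rw [if_pos hd]
              have hc1 : cost = 1 := by rw [hcost, if_neg hcc]
              rw [if_neg (by omega)]
          · by_cases hins : (pvRowF r h (i' + 1)).getD (j' + 1) 0 = (pvRowF r h (i' + 1)).getD j' 0 + 1
            · rw [pvBackA, if_neg h00,
                  if_neg (by
                    rintro ⟨-, -, hcon⟩
                    simp only [Nat.add_sub_cancel] at hcon
                    rw [hA, hB] at hcon
                    exact hd hcon),
                  if_pos ⟨by omega, by
                    simp only [Nat.add_sub_cancel]
                    rw [hA, hC, hins]⟩]
              simp only [Nat.add_sub_cancel]
              rw [ih (i' + 1) j' c (by omega) hi (by omega)]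
              conv_rhs => rw [pvC]
              simp only [← hcost]
              rw [if_neg hd, if_pos hins]
            · have hdel : (pvRowF r h (i' + 1)).getD (j' + 1) 0 = (pvRowF r h i').getD (j' + 1) 0 + 1 := by
                omega
              rw [pvBackA, if_neg h00,
                  if_neg (by
                    rintro ⟨-, -, hcon⟩
                    simp only [Nat.add_sub_cancel] at hcon
                    rw [hA, hB] at hcon
                    exact hd hcon),
                  if_neg (by
                    rintro ⟨-, hcon⟩
                    simp only [Nat.add_sub_cancel] at hcon
                    rw [hA, hC] at hcon
                    exact hins hcon),
                  if_pos ⟨by omega, by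
                    simp only [Nat.add_sub_cancel]
                    rw [hA, hD, hdel]⟩]
              simp only [Nat.add_sub_cancel]
              rw [ih i' (j' + 1) c (by omega) hi' (by omega)]
              conv_rhs => rw [pvC]
              simp only [← hcost]
              rw [if_neg hd, if_neg hins]

-- row i of B's (cost, chain) pairs, as pvRowF and pvC read it
def pvPairRow (r h : List Char) (i : Nat) : List (Nat × List Nat) :=
  (List.range (h.length + 1)).map (fun j => ((pvRowF r h i).getD j 0, pvC r h i j))

lemma pvPairRow_getElem (r h : List Char) (i t : Nat) (ht : t < h.length + 1) :
    (pvPairRow r h i)[t]'(by simp [pvPairRow]; omega) = ((pvRowF r h i).getD t 0, pvC r h i t) := by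
  simp [pvPairRow]

lemma pvPairRow_length (r h : List Char) (i : Nat) : (pvPairRow r h i).length = h.length + 1 := by
  simp [pvPairRow]

lemma pvRowB_nil (c : Char) (i : Nat) (pc : List (Nat × List Nat)) (l : Nat) (ch : List Nat) :
    pvRowB c i [] pc l ch = [] := rfl

-- B's inner loop computes the next row of pairs, suffix by suffix
lemma rowB_spec (r h : List Char) (i' : Nat) : ∀ n t, t ≤ h.length → n = h.length - t →
    pvRowB (r.getD i' ' ') (i' + 1) (h.drop t) ((pvPairRow r h i').drop t)
        ((pvRowF r h (i' + 1)).getD t 0) (pvC r h (i' + 1) t)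
      = (pvPairRow r h (i' + 1)).drop (t + 1) := by
  intro n
  induction n with
  | zero =>
    intro t ht hn
    have hteq : t = h.length := by omega
    subst hteq
    rw [List.drop_eq_nil_of_le (le_refl _), pvRowB_nil,
        List.drop_eq_nil_of_le (show (pvPairRow r h (i' + 1)).length ≤ h.length + 1 by rw [pvPairRow_length])]
  | succ n ihn =>
    intro t ht hn
    have ht' : t < h.length := by omega
    have hpP1 : t + 1 < (pvPairRow r h i').length := by rw [pvPairRow_length]; omega
    have hpP0 : t < (pvPairRow r h i').length := by omega
    have hpC1 : t + 1 < (pvPairRow r h (i' + 1)).length := by rw [pvPairRow_length]; omega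
    rw [List.drop_eq_getElem_cons ht', List.drop_eq_getElem_cons hpP0,
        List.drop_eq_getElem_cons hpP1, pvRowB]
    have hchar : h[t] = h.getD t ' ' := (List.getD_eq_getElem _ _ ht').symm
    simp only [hchar, pvPairRow_getElem r h i' t (by omega),
        pvPairRow_getElem r h i' (t + 1) (by omega)]
    set cost := (if r.getD i' ' ' = h.getD t ' ' then 0 else 1) with hcost
    have hrec := pvRowF_rec r h i' t ht'
    have hbest : min ((pvRowF r h i').getD (t+1) 0 + 1)
        (min ((pvRowF r h (i' + 1)).getD t 0 + 1) ((pvRowF r h i').getD t 0 + cost))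
        = (pvRowF r h (i' + 1)).getD (t + 1) 0 := by rw [hrec]
    rw [hbest]
    -- identify the chosen chain with pvC at (i'+1, t+1)
    have hch : (if (pvRowF r h (i' + 1)).getD (t + 1) 0 = (pvRowF r h i').getD t 0 + cost then
          (if cost = 0 then (i' + 1 - 1) :: pvC r h i' t else pvC r h i' t)
        else if (pvRowF r h (i' + 1)).getD (t + 1) 0 = (pvRowF r h (i' + 1)).getD t 0 + 1 then
          pvC r h (i' + 1) t
        else pvC r h i' (t + 1)) = pvC r h (i' + 1) (t + 1) := by
      conv_rhs => rw [pvC]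
      simp only [← hcost, Nat.add_sub_cancel]
    rw [hch]
    have hrest := ihn (t + 1) (by omega) (by omega)
    rw [List.drop_eq_getElem_cons hpP1,
        pvPairRow_getElem r h i' (t + 1) (by omega)] at hrest
    rw [hrest]
    rw [List.drop_eq_getElem_cons hpC1,
        pvPairRow_getElem r h (i' + 1) (t + 1) (by omega),
        List.getD_eq_getElem _ _ (show t + 1 < (pvRowF r h (i' + 1)).length by rw [pvRowF_length]; omega)]

-- B's outer loop reaches the last row of pairs
lemma rowsB_spec (r h : List Char) : ∀ (cs : List Char) (t : Nat),
    cs = r.drop t → t ≤ r.length →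
    pvRowsB h cs (pvPairRow r h t) (t + 1) = pvPairRow r h r.length := by
  intro cs
  induction cs with
  | nil =>
    intro t hcs ht
    have hteq : t = r.length := by
      have h2 := congrArg List.length hcs
      simp at h2
      omega
    subst hteq
    rw [pvRowsB]
  | cons c cs' ih =>
    intro t hcs ht
    have htlen : t < r.length := by
      by_contra hge
      rw [List.drop_eq_nil_of_le (by omega)] at hcs
      simp at hcs
    rw [List.drop_eq_getElem_cons htlen] at hcs
    injection hcs with hc hcs'
    rw [pvRowsB]
    have hstep := rowB_spec r h t (h.length - 0) 0 (by omega) (by omega)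
    simp only [List.drop_zero] at hstep
    rw [pvRowF_getD0, pvC_zr] at hstep
    have hcchar : c = r.getD t ' ' := by rw [hc, List.getD_eq_getElem _ _ htlen]
    rw [hcchar, hstep]
    have hpc : (t + 1, ([] : List Nat)) :: (pvPairRow r h (t + 1)).drop 1 = pvPairRow r h (t + 1) := by
      have h1 : 0 < (pvPairRow r h (t + 1)).length := by rw [pvPairRow_length]; omega
      have h2 := List.drop_eq_getElem_cons (i := 0) (l := pvPairRow r h (t + 1)) h1
      rw [List.drop_zero] at h2
      conv_rhs => rw [h2]
      rw [pvPairRow_getElem r h (t + 1) 0 (by omega), pvRowF_getD0, pvC_zr]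
    rw [hpc]
    exact ih (t + 1) hcs' (by omega)

-- ===== VERDICT (by name: the statement is the Claim_ definition above) =====
theorem per_position_errors_spec : Claim_equal_per_position_errors := by
  intro hypothesis reference _hdom
  unfold Spec_per_position_errors per_position_errors per_position_errors_alt
  set h := (PySem.Str.upper (PySem.Str.strip hypothesis)).toList
  set r := (PySem.Str.upper (PySem.Str.strip reference)).toList
  by_cases hr : r = []
  · simp [hr]
  · simp only [hr, if_false]
    -- A side: backtrace = decode of the (n, m) chain
    have hA : pvBackA r h (pvBuildDP r h) (r.length + h.length) r.length h.length
        (List.replicate r.length false)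
        = pvDecode (pvC r h r.length h.length) (List.replicate r.length false) :=
      backA_eq_C r h (r.length + h.length) r.length h.length _ (le_refl _) (le_refl _) (le_refl _)
    -- B side: the forward pass's last row at m carries the (n, m) chain
    have h0 : (List.range (h.length + 1)).map (fun j => (j, ([] : List Nat)))
        = pvPairRow r h 0 := by
      rw [pvPairRow]
      apply List.map_congr_left
      intro j hj
      rw [List.mem_range] at hj
      rw [pvRowF_row0 r h j (by omega), pvC_zl]
    have hB : pvRowsB h r ((List.range (h.length + 1)).map (fun j => (j, ([] : List Nat)))) 1
        = pvPairRow r h r.length := by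
      rw [h0]
      have := rowsB_spec r h r 0 (by simp) (by omega)
      rw [show pvPairRow r h 0 = pvPairRow r h 0 from rfl] at this
      exact this
    rw [hA, hB,
        List.getD_eq_getElem _ _ (show h.length < (pvPairRow r h r.length).length by
          rw [pvPairRow_length]; omega),
        pvPairRow_getElem r h r.length h.length (by omega)]
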